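-- pv_equiv track=rewrite | github.com/MikitaTsiarentsyeu/Md-PT1-50-22 | Tasks/Zhukovets/Task5/Task5.py | fib_with_closure
-- ===== SOURCE A (Python) =====
-- def fibonacci(n):
--     """func without closure, but it doesn't return the string we need """
--     if n == 1:
--         return 0
--     if n == 2:
--         return 1
--     return fibonacci(n - 1) + fibonacci(n - 2)
--
-- def fib_with_closure(number_of_iterations):
--     def fib(n):
--         if n == 1:
--             return 0
--         if n == 2:
--             return 1
--         return fibonacci(n - 1) + fibonacci(n - 2)
--     all_numbers = [str(fib(i)) for i in range(1, number_of_iterations + 1)]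
--     return ','.join(all_numbers)
-- ===== SOURCE B (Python) =====
-- def fib_with_closure(number_of_iterations):
--     parts = []
--     a, b = 0, 1
--     for _ in range(number_of_iterations):
--         parts.append(str(a))
--         a, b = b, a + b
--     return ','.join(parts)
-- ===== Notes on version B (the rewrite author's own statement) =====
-- stated objective: faster
-- what changed: Replaced the doubly-exponential naive recursion (fibonacci recomputed from scratch for every i) by a single iterative pass maintaining the last two Fibonacci numbers.
import Mathlib
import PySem

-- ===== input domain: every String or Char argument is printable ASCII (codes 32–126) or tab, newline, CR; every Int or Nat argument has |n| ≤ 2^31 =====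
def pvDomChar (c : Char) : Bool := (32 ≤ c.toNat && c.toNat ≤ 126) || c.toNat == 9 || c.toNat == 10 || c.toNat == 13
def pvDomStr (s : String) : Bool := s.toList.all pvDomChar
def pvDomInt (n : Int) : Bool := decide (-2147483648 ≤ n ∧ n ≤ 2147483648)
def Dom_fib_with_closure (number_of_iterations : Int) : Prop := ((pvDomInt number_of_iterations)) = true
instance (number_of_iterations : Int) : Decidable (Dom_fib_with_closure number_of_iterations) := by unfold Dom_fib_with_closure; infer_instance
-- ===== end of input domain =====

-- B replaces A's exponential naive double recursion with a linear iterative pass; return values are equal for every Int input.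
-- ===== PORT A =====
-- literal port of A's helper 'fibonacci'; the 'n < 1' guard only makes the recursion
-- well-founded — Python diverges there and fib_with_closure never calls it with n < 1
def pvFibonacci (n : Int) : Int :=
  if n = 1 then 0
  else if n = 2 then 1
  else if n < 1 then 0
  else pvFibonacci (n - 1) + pvFibonacci (n - 2)
termination_by n.toNat
decreasing_by all_goals omega

def fib_with_closure (number_of_iterations : Int) : String :=
  let fib := fun (n : Int) =>
    if n = 1 then (0 : Int)
    else if n = 2 then 1
    else pvFibonacci (n - 1) + pvFibonacci (n - 2)
  let all_numbers := (PySem.List.pyRange 1 (number_of_iterations + 1) 1).map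
    (fun i => PySem.Int.toStr (fib i))
  PySem.Str.join "," all_numbers

-- ===== PORT B =====
-- loop body of Source B: parts.append(str(a)); a, b = b, a + b
def pvStepB (st : List String × Int × Int) (_ : Int) : List String × Int × Int :=
  (st.1 ++ [PySem.Int.toStr st.2.1], st.2.2, st.2.1 + st.2.2)

def fib_with_closure_alt (number_of_iterations : Int) : String :=
  let st := (PySem.List.pyRange 0 number_of_iterations 1).foldl pvStepB ([], 0, 1)
  PySem.Str.join "," st.1

-- ===== PRECONDITION & SPEC =====
def Spec_fib_with_closure (number_of_iterations : Int) (out : String) : Prop := out = fib_with_closure_alt number_of_iterations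
instance (number_of_iterations : Int) (out : String) : Decidable (Spec_fib_with_closure number_of_iterations out) := by unfold Spec_fib_with_closure; infer_instance

-- ===== CLAIM (what is proved, stated in full; the proofs are below) =====
def Claim_equal_fib_with_closure : Prop := ∀ (number_of_iterations : Int), Dom_fib_with_closure number_of_iterations → Spec_fib_with_closure number_of_iterations (fib_with_closure number_of_iterations)

-- ===== LEMMAS AND PROOFS =====

-- mathematical Fibonacci sequence, reference for both ports
def pvF : Nat → Int
  | 0 => 0
  | 1 => 1
  | n + 2 => pvF n + pvF (n + 1)

theorem pvFibonacci_eq : ∀ (n : Nat), pvFibonacci ((n : Int) + 1) = pvF n := by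
  intro n
  induction n using pvF.induct with
  | case1 => simp [pvFibonacci, pvF]
  | case2 => simp [pvFibonacci, pvF]
  | case3 m ih1 ih2 =>
    rw [pvFibonacci]
    have h1 : ¬ ((((m : Nat) + 2 : Nat) : Int) + 1 = 1) := by push_cast; omega
    have h2 : ¬ ((((m : Nat) + 2 : Nat) : Int) + 1 = 2) := by push_cast; omega
    have h3 : ¬ ((((m : Nat) + 2 : Nat) : Int) + 1 < 1) := by push_cast; omega
    rw [if_neg h1, if_neg h2, if_neg h3]
    have e1 : (((m : Nat) + 2 : Nat) : Int) + 1 - 1 = ((m + 1 : Nat) : Int) + 1 := by push_cast; ring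
    have e2 : (((m : Nat) + 2 : Nat) : Int) + 1 - 2 = ((m : Nat) : Int) + 1 := by push_cast; ring
    rw [e1, e2, ih1, ih2, pvF]
    ring

theorem pvLoop (l : List Int) (parts : List String) (j : Nat) :
    l.foldl pvStepB (parts, pvF j, pvF (j + 1)) =
      (parts ++ (List.range' j l.length).map (fun k => PySem.Int.toStr (pvF k)),
        pvF (j + l.length), pvF (j + l.length + 1)) := by
  induction l generalizing parts j with
  | nil => simp
  | cons x xs ih =>
    simp only [List.foldl_cons, pvStepB]
    rw [show pvF j + pvF (j + 1) = pvF ((j + 1) + 1) from rfl]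
    rw [ih (parts ++ [PySem.Int.toStr (pvF j)]) (j + 1)]
    simp only [List.length_cons, List.range'_succ, List.map_cons, List.append_assoc,
      List.cons_append, List.nil_append]
    have h : j + 1 + xs.length = j + (xs.length + 1) := by omega
    rw [h]

theorem pvBody_eq (k : Nat) :
    (if (1 : Int) + (k : Int) = 1 then (0 : Int)
     else if (1 : Int) + (k : Int) = 2 then 1
     else pvFibonacci (1 + (k : Int) - 1) + pvFibonacci (1 + (k : Int) - 2)) = pvF k := by
  match k with
  | 0 => simp [pvF]
  | 1 => norm_num [pvF]
  | (m + 2) =>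
    have h1 : ¬ ((1 : Int) + ((m + 2 : Nat) : Int) = 1) := by push_cast; omega
    have h2 : ¬ ((1 : Int) + ((m + 2 : Nat) : Int) = 2) := by push_cast; omega
    rw [if_neg h1, if_neg h2]
    have e1 : (1 : Int) + ((m + 2 : Nat) : Int) - 1 = ((m + 1 : Nat) : Int) + 1 := by push_cast; ring
    have e2 : (1 : Int) + ((m + 2 : Nat) : Int) - 2 = ((m : Nat) : Int) + 1 := by push_cast; ring
    rw [e1, e2, pvFibonacci_eq, pvFibonacci_eq, pvF]
    ring

theorem pv_main (n : Int) : fib_with_closure n = fib_with_closure_alt n := by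
  unfold fib_with_closure fib_with_closure_alt
  simp only []
  rw [PySem.List.pyRange_one 1 (n + 1), PySem.List.pyRange_one 0 n]
  have hlen : ((List.range (n - 0).toNat).map (fun k : Nat => (0 : Int) + k)).length = n.toNat := by
    simp
  rw [show ([] , (0 : Int), (1 : Int)) = (([] : List String), pvF 0, pvF 1) from rfl]
  rw [pvLoop]
  rw [hlen]
  congr 1
  simp only [List.map_map, List.nil_append]
  rw [List.range_eq_range']
  have harg : (n + 1 - 1).toNat = n.toNat := by omega
  rw [harg]
  apply List.map_congr_left
  intro k _
  exact congrArg PySem.Int.toStr (pvBody_eq k)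

-- ===== VERDICT (by name: the statement is the Claim_ definition above) =====
theorem fib_with_closure_spec : Claim_equal_fib_with_closure := by
  intro n _
  unfold Spec_fib_with_closure
  exact pv_main n
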